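-- pv_equiv track=rewrite | github.com/dbaxter240/BookCrossingData | knnMovies.py | SplitDataIntoNFolds
-- ===== SOURCE A (Python) =====
-- def SplitDataIntoNFolds(UtoM, numFolds):
-- 	folds = [];
-- 	for i in range(0, numFolds):
-- 		folds.append({});
-- 	for uID in UtoM.keys():
-- 		#Split this user's movies into folds
-- 		movies = UtoM[uID];
-- 		partitioned = [];
-- 		for i in range(0, numFolds):
-- 			partitioned.append({});
-- 		ind = 0;
-- 		for m in UtoM[uID].keys():
-- 			partitioned[ind][m] = UtoM[uID][m];
-- 			ind = (ind + 1)%numFolds;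
--
-- 		for i in range(0, numFolds):
-- 			folds[i][uID] = partitioned[i];
--
-- 	return folds;
-- ===== SOURCE B (Python) =====
-- def SplitDataIntoNFolds(UtoM, numFolds):
--     folds = [{} for _ in range(numFolds)]
--     for uID in UtoM:
--         items = list(UtoM[uID].items())
--         for i in range(numFolds):
--             folds[i][uID] = dict(items[i::numFolds])
--     return folds
-- ===== Notes on version B (the rewrite author's own statement) =====
-- stated objective: idiomatic
-- what changed: A scatters each user's movies one by one into numFolds dicts with a running round-robin index counter via an intermediate 'partitioned' list; B gathers each fold directly as dict(items[i::numFolds]) with a strided slice over the precomputed item list, removing the counter and the intermediate list.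
import Mathlib
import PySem

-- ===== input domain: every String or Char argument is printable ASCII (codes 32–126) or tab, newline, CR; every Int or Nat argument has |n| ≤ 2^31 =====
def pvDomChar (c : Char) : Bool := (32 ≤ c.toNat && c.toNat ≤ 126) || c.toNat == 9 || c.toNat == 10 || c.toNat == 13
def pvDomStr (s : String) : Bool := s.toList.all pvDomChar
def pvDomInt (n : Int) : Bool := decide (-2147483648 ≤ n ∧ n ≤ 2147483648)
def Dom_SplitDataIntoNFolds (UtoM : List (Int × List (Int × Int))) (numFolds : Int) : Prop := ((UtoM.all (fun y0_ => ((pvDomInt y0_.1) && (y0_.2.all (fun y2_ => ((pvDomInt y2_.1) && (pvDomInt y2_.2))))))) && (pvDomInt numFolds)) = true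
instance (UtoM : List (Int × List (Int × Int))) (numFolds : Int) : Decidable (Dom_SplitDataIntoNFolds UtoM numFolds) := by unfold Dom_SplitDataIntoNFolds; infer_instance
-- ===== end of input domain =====

-- B replaces A's per-movie round-robin scatter (index counter + intermediate 'partitioned' list)
-- by a per-fold gather via strided slices items[i::numFolds]; equivalence of return values proved on Pre_.

-- ===== PORT A =====
-- A-side helper: the body of 'for m in UtoM[uID].keys(): partitioned[ind][m] = UtoM[uID][m]; ind = (ind+1)%numFolds'.
-- The dict loop 'for m in d.keys(): … d[m] …' is ported as iteration over d's (key, value) pairs — exact for dicts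
-- (unique keys); the list write 'partitioned[ind][m] = …' is exact for 0 ≤ ind < len(partitioned), which holds
-- whenever the Python does not raise IndexError (Pre_ excludes the raising inputs).
def pvScatterStep (numFolds : Int) (st : List (PySem.Dict Int Int) × Int) (p : Int × Int) :
    List (PySem.Dict Int Int) × Int :=
  (st.1.set st.2.toNat ((PySem.List.pyGetD st.1 st.2 PySem.Dict.empty).insert p.1 p.2),
   PySem.Int.mod (st.2 + 1) numFolds)

def SplitDataIntoNFolds (UtoM : List (Int × List (Int × Int))) (numFolds : Int) :
    List (List (Int × List (Int × Int))) :=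
  let folds0 : List (PySem.Dict Int (List (Int × Int))) :=
    (PySem.List.pyRange 0 numFolds 1).foldl (fun acc _ => acc ++ [PySem.Dict.empty]) []
  let folds := UtoM.foldl (fun folds u =>
    let partitioned0 : List (PySem.Dict Int Int) :=
      (PySem.List.pyRange 0 numFolds 1).foldl (fun acc _ => acc ++ [PySem.Dict.empty]) []
    let st := u.2.foldl (pvScatterStep numFolds) (partitioned0, 0)
    (PySem.List.pyRange 0 numFolds 1).foldl (fun folds i =>
      folds.set i.toNat ((PySem.List.pyGetD folds i PySem.Dict.empty).insert u.1
        (PySem.List.pyGetD st.1 i PySem.Dict.empty).items)) folds) folds0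
  folds.map (·.items)

-- ===== PORT B =====
def SplitDataIntoNFolds_alt (UtoM : List (Int × List (Int × Int))) (numFolds : Int) :
    List (List (Int × List (Int × Int))) :=
  let folds0 : List (PySem.Dict Int (List (Int × Int))) :=
    (PySem.List.pyRange 0 numFolds 1).map (fun _ => PySem.Dict.empty)
  let folds := UtoM.foldl (fun folds u =>
    (PySem.List.pyRange 0 numFolds 1).foldl (fun folds i =>
      folds.set i.toNat ((PySem.List.pyGetD folds i PySem.Dict.empty).insert u.1
        (PySem.Dict.ofList ((PySem.List.slice? u.2 (some i) none numFolds).getD [])).items)) folds) folds0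
  folds.map (·.items)

-- ===== PRECONDITION & SPEC =====
-- Pre_ excludes exactly the inputs on which Python A raises IndexError: numFolds ≤ 0 together with
-- at least one user whose movie dict is non-empty ('partitioned[0]' on an empty 'partitioned').
def Pre_SplitDataIntoNFolds (UtoM : List (Int × List (Int × Int))) (numFolds : Int) : Prop :=
  1 ≤ numFolds ∨ ∀ p ∈ UtoM, p.2 = []
instance (UtoM : List (Int × List (Int × Int))) (numFolds : Int) : Decidable (Pre_SplitDataIntoNFolds UtoM numFolds) := by unfold Pre_SplitDataIntoNFolds; infer_instance

def pvWitness_SplitDataIntoNFolds : (List (Int × List (Int × Int))) × Int :=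
  ([(1, [(2, 3), (4, 5), (6, 7)]), (2, [(8, 9)])], 2)

def Spec_SplitDataIntoNFolds (UtoM : List (Int × List (Int × Int))) (numFolds : Int) (out : List (List (Int × List (Int × Int)))) : Prop := out = SplitDataIntoNFolds_alt UtoM numFolds
instance (UtoM : List (Int × List (Int × Int))) (numFolds : Int) (out : List (List (Int × List (Int × Int)))) : Decidable (Spec_SplitDataIntoNFolds UtoM numFolds out) := by unfold Spec_SplitDataIntoNFolds; infer_instance

-- ===== CLAIM (what is proved, stated in full; the proofs are below) =====
def Claim_equal_SplitDataIntoNFolds : Prop := ∀ (UtoM : List (Int × List (Int × Int))) (numFolds : Int), Dom_SplitDataIntoNFolds UtoM numFolds → Pre_SplitDataIntoNFolds UtoM numFolds → Spec_SplitDataIntoNFolds UtoM numFolds (SplitDataIntoNFolds UtoM numFolds)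


-- ===== LEMMAS AND PROOFS =====

-- every numFolds-th element of a list, starting at its head
def pvG {α : Type} (n : Nat) : List α → List α
  | [] => []
  | x :: xs => x :: pvG n (xs.drop (n - 1))
termination_by l => l.length
decreasing_by simp

lemma pvFm {α : Type} (n : Nat) (hn : 0 < n) :
    ∀ (c s : Nat) (L : List α), c = (L.length - s + n - 1) / n →
      (List.range c).filterMap (fun k => L[s + n * k]?) = pvG n (L.drop s) := by
  intro c
  induction c with
  | zero =>
    intro s L hc
    have hle : L.length ≤ s := by
      rcases Nat.lt_or_ge (L.length - s + n - 1) n with h | h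
      · omega
      · exfalso
        have := Nat.div_le_div_right (c := n) h
        rw [Nat.div_self hn] at this
        omega
    rw [List.drop_eq_nil_of_le hle]
    simp [pvG]
  | succ c ih =>
    intro s L hc
    have hs : s < L.length := by
      by_contra h
      have hlt : L.length - s + n - 1 < n := by omega
      rw [Nat.div_eq_of_lt hlt] at hc
      omega
    rw [List.drop_eq_getElem_cons hs]
    rw [pvG]
    have hdd : (L.drop (s + 1)).drop (n - 1) = L.drop (s + n) := by
      rw [List.drop_drop]
      congr 1
      omega
    rw [hdd]
    rw [List.range_succ_eq_map, List.filterMap_cons, List.filterMap_map]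
    have h0 : L[s + n * 0]? = some L[s] := by
      simp [hs]
    rw [h0]
    have hfun : ((fun k => L[s + n * k]?) ∘ Nat.succ) = (fun k => L[(s + n) + n * k]?) := by
      funext k
      simp only [Function.comp]
      congr 1
      rw [Nat.succ_eq_add_one]
      ring
    rw [hfun]
    rw [ih (s + n) L ?_]
    · have h1 : L.length - s + n - 1 = (L.length - s - 1) + n := by omega
      rw [h1, Nat.add_div_right _ hn] at hc
      rcases Nat.lt_or_ge (L.length - s) n with h | h
      · have e1 : L.length - (s + n) + n - 1 = n - 1 := by omega
        rw [e1, Nat.div_eq_of_lt (by omega)]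
        rw [Nat.div_eq_of_lt (by omega)] at hc
        omega
      · have e1 : L.length - (s + n) + n - 1 = L.length - s - 1 := by omega
        rw [e1]; omega

lemma pvSlice_eq (L : List (Int × Int)) (i n : Int) (h0 : 0 ≤ i) (hn : 0 < n) :
    (PySem.List.slice? L (some i) none n).getD [] = pvG n.toNat (L.drop i.toNat) := by
  unfold PySem.List.slice? PySem.List.sliceIndices
  have h1 : ¬ n = 0 := by omega
  have h2 : ¬ n < 0 := by omega
  have h3 : ¬ i < 0 := by omega
  simp only [h1, h2, h3, if_false]
  rw [if_pos hn]
  have hmin : min i (L.length : Int) = ((min i.toNat L.length : Nat) : Int) := by omega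
  rw [hmin]
  have e2 : n = (n.toNat : Int) := by omega
  have hcount : (if ((min i.toNat L.length : Nat) : Int) < (L.length : Int) then
        (((L.length : Int) - ((min i.toNat L.length : Nat) : Int) + n - 1) / n).toNat else 0)
      = (L.length - min i.toNat L.length + n.toNat - 1) / n.toNat := by
    split_ifs with h
    · have e1 : ((L.length : Int) - ((min i.toNat L.length : Nat) : Int) + n - 1)
          = ((L.length - min i.toNat L.length + n.toNat - 1 : Nat) : Int) := by omega
      rw [e1]
      conv_lhs => rw [e2]
      rw [← Int.natCast_div, Int.toNat_natCast]
      have e4 : ((n.toNat : Int)).toNat = n.toNat := by omega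
      rw [e4]
    · have hs : min i.toNat L.length = L.length := by omega
      rw [hs]
      rw [Nat.div_eq_of_lt (by omega)]
  rw [hcount]
  have hidx : ∀ k : Nat, (((min i.toNat L.length : Nat) : Int) + n * (k : Int)).toNat
      = min i.toNat L.length + n.toNat * k := by
    intro k
    have e3 : (((min i.toNat L.length : Nat) : Int) + n * (k : Int))
        = ((min i.toNat L.length + n.toNat * k : Nat) : Int) := by
      conv_lhs => rw [e2]
      push_cast
      ring
    rw [e3, Int.toNat_natCast]
  simp only [hidx, Option.getD_some]
  rw [pvFm n.toNat (by omega) _ _ L rfl]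
  rcases Nat.lt_or_ge i.toNat L.length with h | h
  · have e4 : min i.toNat L.length = i.toNat := by omega
    rw [e4]
  · rw [List.drop_eq_nil_of_le (by omega), List.drop_eq_nil_of_le h]

lemma pvScatter (n : Int) (hn : 1 ≤ n) :
    ∀ (L : List (Int × Int)) (ps : List (PySem.Dict Int Int)) (ind : Int),
      ps.length = n.toNat → 0 ≤ ind → ind < n →
      ∀ i : Int, 0 ≤ i → i < n →
        PySem.List.pyGetD (L.foldl (pvScatterStep n) (ps, ind)).1 i PySem.Dict.empty
          = (PySem.List.pyGetD ps i PySem.Dict.empty).update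
              (pvG n.toNat (L.drop ((PySem.Int.mod (i - ind) n).toNat))) := by
  intro L
  induction L with
  | nil =>
    intro ps ind hlen hind0 hind1 i hi0 hi1
    simp [pvG, PySem.Dict.update]
  | cons p L ih =>
    intro ps ind hlen hind0 hind1 i hi0 hi1
    have hm : ∀ a : Int, PySem.Int.mod a n = a % n :=
      fun a => PySem.Int.mod_eq_emod_of_pos (by omega)
    have hkey : ∀ a b : Int, (a - b % n) % n = (a - b) % n := by
      intro a b
      conv_lhs => rw [Int.sub_emod]
      rw [Int.emod_emod_of_dvd _ dvd_rfl, ← Int.sub_emod]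
    rw [List.foldl_cons]
    have hstep : pvScatterStep n (ps, ind) p
        = (ps.set ind.toNat ((PySem.List.pyGetD ps ind PySem.Dict.empty).insert p.1 p.2),
           (ind + 1) % n) := by
      simp [pvScatterStep, hm]
    rw [hstep]
    rw [ih _ _ (by simp [hlen]) (Int.emod_nonneg _ (by omega)) (Int.emod_lt_of_pos _ (by omega))
        i hi0 hi1]
    simp only [hm]
    have hiL : i.toNat < ps.length := by omega
    by_cases hEq : i = ind
    · subst hEq
      have hA : PySem.List.pyGetD
            (ps.set i.toNat ((PySem.List.pyGetD ps i PySem.Dict.empty).insert p.1 p.2))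
            i PySem.Dict.empty
          = (PySem.List.pyGetD ps i PySem.Dict.empty).insert p.1 p.2 := by
        rw [PySem.List.pyGetD_eq_getElem
              (ps.set i.toNat ((PySem.List.pyGetD ps i PySem.Dict.empty).insert p.1 p.2))
              (i := i) PySem.Dict.empty hi0 (by rw [List.length_set]; omega)]
        exact List.getElem_set_self _
      rw [hA]
      have e1 : (i - (i + 1) % n) % n = n - 1 := by
        rw [hkey, show i - (i + 1) = -1 from by ring,
            show (-1 : Int) = (n - 1) + n * (-1) from by ring,
            Int.add_mul_emod_self_left]
        exact Int.emod_eq_of_lt (by omega) (by omega)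
      have e0 : (i - i) % n = 0 := by
        rw [show i - i = (0 : Int) from by ring, Int.zero_emod]
      rw [e1, e0]
      have e2 : ((0 : Int)).toNat = 0 := rfl
      rw [e2, List.drop_zero]
      rw [show pvG n.toNat (p :: L) = p :: pvG n.toNat (L.drop (n.toNat - 1)) from by rw [pvG]]
      have e3 : ((n : Int) - 1).toNat = n.toNat - 1 := by omega
      rw [e3]
      simp [PySem.Dict.update]
    · have hA : PySem.List.pyGetD
            (ps.set ind.toNat ((PySem.List.pyGetD ps ind PySem.Dict.empty).insert p.1 p.2))
            i PySem.Dict.empty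
          = PySem.List.pyGetD ps i PySem.Dict.empty := by
        rw [PySem.List.pyGetD_of_nonneg _ _ hi0, PySem.List.pyGetD_of_nonneg _ _ hi0,
            List.getD_eq_getElem?_getD, List.getD_eq_getElem?_getD,
            List.getElem?_set_ne (by omega)]
      rw [hA]
      have hjj : ((i - ind) % n).toNat = ((i - (ind + 1) % n) % n).toNat + 1 := by
        rw [hkey]
        by_cases hlt : ind < i
        · rw [Int.emod_eq_of_lt (by omega) (by omega),
              show i - (ind + 1) = i - ind - 1 from by ring,
              Int.emod_eq_of_lt (by omega) (by omega)]
          omega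
        · have hlt2 : i < ind := by omega
          rw [show i - ind = (i - ind + n) + n * (-1) from by ring,
              Int.add_mul_emod_self_left,
              Int.emod_eq_of_lt (by omega) (by omega),
              show i - (ind + 1) = (i - ind - 1 + n) + n * (-1) from by ring,
              Int.add_mul_emod_self_left,
              Int.emod_eq_of_lt (by omega) (by omega)]
          omega
      rw [hjj, List.drop_succ_cons]

-- ===== VERDICT (by name: the statement is the Claim_ definition above) =====
-- folds starts as []; each user is processed by an identical per-fold write loop in A and B,
-- so it suffices that A's scattered partition equals B's strided slice at every fold index.
theorem SplitDataIntoNFolds_spec : Claim_equal_SplitDataIntoNFolds := by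
  intro UtoM numFolds _ _
  unfold Spec_SplitDataIntoNFolds
  rcases Int.lt_or_le numFolds 1 with hn | hn
  · have hr : PySem.List.pyRange 0 numFolds 1 = [] :=
      PySem.List.pyRange_one_eq_nil (by omega)
    simp [SplitDataIntoNFolds, SplitDataIntoNFolds_alt, hr]
  · simp only [SplitDataIntoNFolds, SplitDataIntoNFolds_alt,
      PySem.List.foldl_append_singleton_eq_map, List.nil_append]
    refine congrArg (List.map _) ?_
    refine PySem.List.foldl_congr_mem _ _ _ _ ?_
    intro acc u _
    refine PySem.List.foldl_congr_mem _ _ _ _ ?_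
    intro folds i hi
    rcases PySem.List.mem_pyRange_one.mp hi with ⟨hi0, hi1⟩
    have key : PySem.List.pyGetD
          (u.2.foldl (pvScatterStep numFolds)
            ((PySem.List.pyRange 0 numFolds 1).map (fun _ => PySem.Dict.empty), 0)).1
          i PySem.Dict.empty
        = PySem.Dict.ofList ((PySem.List.slice? u.2 (some i) none numFolds).getD []) := by
      rw [pvScatter numFolds hn u.2 _ 0
          (by simp [PySem.List.length_pyRange_one]) le_rfl (by omega) i hi0 hi1]
      rw [PySem.List.pyGetD_map_pyRange_of_nonneg _ numFolds i _ hi0 hi1]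
      rw [show i - 0 = i from by ring,
          PySem.Int.mod_eq_emod_of_pos (by omega), Int.emod_eq_of_lt hi0 hi1]
      rw [pvSlice_eq u.2 i numFolds hi0 (by omega)]
      rfl
    rw [key]
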